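-- pv_equiv track=rewrite | github.com/NEA-Project-CCG/NEA | Battle_Calculators.py | Buff_calculator
-- ===== SOURCE A (Python) =====
-- def Buff_calculator(buffs: list[str], buffs_to_be_applied: list[str]) -> list[str]:
--     for application in buffs_to_be_applied:
--         buffs.append(application)
--
--     #applies buffs
--     buffs_set = set(buffs)
--     buffs = []
--     for buff in buffs_set:
--         buffs.append(buff)
--     buffs.sort()
--
--     return buffs
-- ===== SOURCE B (Python) =====
-- def Buff_calculator(buffs: list[str], buffs_to_be_applied: list[str]) -> list[str]:
--     buffs.extend(buffs_to_be_applied)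
--     result = []
--     for x in sorted(buffs):
--         if not result or result[-1] != x:
--             result.append(x)
--     return result
-- ===== Notes on version B (the rewrite author's own statement) =====
-- stated objective: alternative
-- what changed: Dedupes by sorting first and skipping adjacent equal elements in one scan, instead of building a hash set and then sorting it.
import Mathlib
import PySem

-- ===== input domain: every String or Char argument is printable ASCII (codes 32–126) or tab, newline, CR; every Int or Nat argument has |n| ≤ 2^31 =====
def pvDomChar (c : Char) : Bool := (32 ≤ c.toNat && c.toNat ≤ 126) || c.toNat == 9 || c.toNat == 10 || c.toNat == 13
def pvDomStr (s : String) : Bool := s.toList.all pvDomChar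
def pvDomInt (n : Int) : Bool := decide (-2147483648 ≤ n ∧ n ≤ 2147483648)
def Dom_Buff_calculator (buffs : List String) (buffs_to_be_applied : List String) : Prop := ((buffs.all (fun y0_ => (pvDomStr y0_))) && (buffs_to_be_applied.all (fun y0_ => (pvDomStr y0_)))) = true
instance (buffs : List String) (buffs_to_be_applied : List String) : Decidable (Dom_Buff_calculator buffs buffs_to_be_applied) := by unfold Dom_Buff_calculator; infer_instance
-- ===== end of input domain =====

-- B dedupes by sorting first and skipping adjacent equal elements in one scan, instead of
-- building a hash set and then sorting it; both mutate `buffs` in place (extend) — the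
-- equivalence proved here is about the return value only (the mutation is identical anyway).

-- ===== PORT A =====
def Buff_calculator (buffs : List String) (buffs_to_be_applied : List String) : List String :=
  -- for application in buffs_to_be_applied: buffs.append(application)
  let buffs1 := buffs_to_be_applied.foldl (fun b a => b ++ [a]) buffs
  -- buffs_set = set(buffs)
  let buffs_set : PySem.Set String := PySem.Set.ofList buffs1
  -- buffs = []; for buff in buffs_set: buffs.append(buff)   (result is sorted next, so order-safe)
  let buffs2 := buffs_set.foldl (fun l b => l ++ [b]) ([] : List String)
  -- buffs.sort()
  PySem.List.sorted buffs2 (fun x => x) false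

-- ===== PORT B =====
def Buff_calculator_alt (buffs : List String) (buffs_to_be_applied : List String) : List String :=
  -- buffs.extend(buffs_to_be_applied)
  let all := buffs ++ buffs_to_be_applied
  -- result = []; for x in sorted(buffs): if not result or result[-1] != x: result.append(x)
  (PySem.List.sorted all (fun x => x) false).foldl
    (fun r x => if r = [] ∨ r.getLast? ≠ some x then r ++ [x] else r) []

-- ===== PRECONDITION & SPEC =====
def Spec_Buff_calculator (buffs : List String) (buffs_to_be_applied : List String) (out : List String) : Prop := out = Buff_calculator_alt buffs buffs_to_be_applied
instance (buffs : List String) (buffs_to_be_applied : List String) (out : List String) : Decidable (Spec_Buff_calculator buffs buffs_to_be_applied out) := by unfold Spec_Buff_calculator; infer_instance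

-- ===== CLAIM (what is proved, stated in full; the proofs are below) =====
def Claim_equal_Buff_calculator : Prop := ∀ (buffs : List String) (buffs_to_be_applied : List String), Dom_Buff_calculator buffs buffs_to_be_applied → Spec_Buff_calculator buffs buffs_to_be_applied (Buff_calculator buffs buffs_to_be_applied)

-- ===== LEMMAS AND PROOFS =====

theorem pv_foldl_app {α : Type} (l acc : List α) :
    l.foldl (fun b a => b ++ [a]) acc = acc ++ l := by
  induction l generalizing acc with
  | nil => simp
  | cons x t ih => simp [List.foldl, ih]

-- in a strictly increasing list, every element is ≤ the last one
theorem pv_le_getLast {α : Type} [LinearOrder α] {l : List α} {a lst : α}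
    (hp : l.Pairwise (· < ·)) (ha : a ∈ l) (hl : l.getLast? = some lst) : a ≤ lst := by
  induction l with
  | nil => cases ha
  | cons x t ih =>
    rcases List.pairwise_cons.mp hp with ⟨hx, ht⟩
    cases t with
    | nil =>
      simp at hl ha; subst hl; simp [ha]
    | cons y u =>
      have hl' : (y :: u).getLast? = some lst := by
        simpa [List.getLast?_cons_cons] using hl
      rcases List.mem_cons.mp ha with rfl | hmem
      · have : lst ∈ y :: u := List.mem_of_getLast? hl'
        exact le_of_lt (hx _ this)
      · exact ih ht hmem hl'

-- main fold invariant: folding the adjacent-dedup step over a ≤-sorted list, starting from a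
-- strictly increasing accumulator whose last element bounds the rest, yields a strictly
-- increasing list with exactly the union of the members.
theorem pv_dedup_fold {α : Type} [LinearOrder α] [DecidableEq α] (ys : List α) :
    ∀ (acc : List α), ys.Pairwise (· ≤ ·) → acc.Pairwise (· < ·) →
    (∀ b ∈ ys, ∀ lst, acc.getLast? = some lst → lst ≤ b) →
    (ys.foldl (fun r x => if r = [] ∨ r.getLast? ≠ some x then r ++ [x] else r) acc).Pairwise (· < ·) ∧
    (∀ x, x ∈ ys.foldl (fun r x => if r = [] ∨ r.getLast? ≠ some x then r ++ [x] else r) acc ↔ x ∈ acc ∨ x ∈ ys) := by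
  induction ys with
  | nil => intro acc _ hacc _; simpa using hacc
  | cons y t ih =>
    intro acc hys hacc hle
    rcases List.pairwise_cons.mp hys with ⟨hyt, ht⟩
    by_cases hc : acc = [] ∨ acc.getLast? ≠ some y
    · -- append y
      have hacc' : (acc ++ [y]).Pairwise (· < ·) := by
        apply List.pairwise_append.mpr
        refine ⟨hacc, List.pairwise_singleton _ _, ?_⟩
        intro a ha b hb
        have hb' : b = y := by simpa using hb
        subst hb'
        obtain ⟨lst, hlst⟩ : ∃ lst, acc.getLast? = some lst := by
          cases h : acc.getLast? with
          | none => rw [List.getLast?_eq_none_iff] at h; rw [h] at ha; cases ha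
          | some l => exact ⟨l, rfl⟩
        have h1 : a ≤ lst := pv_le_getLast hacc ha hlst
        have h2 : lst ≤ b := hle b List.mem_cons_self lst hlst
        have h3 : lst ≠ b := by
          rcases hc with hnil | hne
          · rw [hnil] at hlst; cases hlst
          · intro h; exact hne (h ▸ hlst)
        exact lt_of_le_of_lt h1 (lt_of_le_of_ne h2 h3)
      have hle' : ∀ b ∈ t, ∀ lst, (acc ++ [y]).getLast? = some lst → lst ≤ b := by
        intro b hb lst hlst
        have hy' : y = lst := by simpa [List.getLast?_append] using hlst
        subst hy'
        exact hyt b hb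
      have := ih (acc ++ [y]) ht hacc' hle'
      simp only [List.foldl, if_pos hc]
      refine ⟨this.1, ?_⟩
      intro x
      rw [this.2 x]
      simp [List.mem_append, or_assoc]
    · -- skip: acc.getLast? = some y, so y ∈ acc
      rw [not_or, not_not] at hc
      have hy : y ∈ acc := List.mem_of_getLast? hc.2
      have hle' : ∀ b ∈ t, ∀ lst, acc.getLast? = some lst → lst ≤ b := by
        intro b hb lst hlst
        rw [hc.2] at hlst; cases hlst
        exact hyt b hb
      have := ih acc ht hacc hle'
      have hcond : ¬ (acc = [] ∨ acc.getLast? ≠ some y) := by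
        rw [not_or, not_not]; exact hc
      simp only [List.foldl, if_neg hcond]
      refine ⟨this.1, ?_⟩
      intro x
      rw [this.2 x]
      constructor
      · rintro (h | h) <;> simp [h]
      · rintro (h | h)
        · exact Or.inl h
        · rcases List.mem_cons.mp h with rfl | h
          · exact Or.inl hy
          · exact Or.inr h

-- ===== VERDICT (by name: the statement is the Claim_ definition above) =====
theorem Buff_calculator_spec : Claim_equal_Buff_calculator := by
  intro buffs applied _
  unfold Spec_Buff_calculator Buff_calculator Buff_calculator_alt
  simp only [pv_foldl_app, List.nil_append]
  have hmain := pv_dedup_fold (PySem.List.sorted (buffs ++ applied) (fun x => x) false) []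
    (PySem.List.sorted_pairwise _ _) (by simp) (by simp)
  apply PySem.List.sorted_eq_of_perm_of_pairwise_lt
  · apply (List.perm_ext_iff_of_nodup (hmain.1.nodup) (PySem.Set.nodup_ofList _)).mpr
    intro x
    rw [hmain.2 x]
    simp [PySem.Set.mem_ofList, PySem.List.mem_sorted]
  · exact hmain.1
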